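-- pv_equiv track=rewrite | github.com/sajastu/graph_preprocessor | preprocess_copy.py | make_BIO_tgt
-- ===== SOURCE A (Python) =====
-- from collections import Counter
--
-- def compile_substring(start, end, split):
--     if start == end:
--         return split[start]
--     return " ".join(split[start:end+1])
--
-- def make_BIO_tgt(s, t, mental_retrieve=False):
--     # t should be an array or str
--     # tsplit = t.split()
--     ssplit = s#.split()
--
--     startix = 0
--     endix = 0
--     matches = []
--     matchstrings = Counter()
--     while endix < len(ssplit):
--         # last check is to make sure that phrases at end can be copied
--         searchstring = compile_substring(startix, endix, ssplit)
--
--         if searchstring in t and endix < len(ssplit)-1: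
--             endix += 1
--
--         else:
--             # only phrases, not words
--             # uncomment the -1 if you only want phrases > len 1
--             if startix >= endix:#-1:
--                 matches.extend(["0"] * (endix-startix + 1))
--                 endix += 1
--             else:
--                 # First one has to be 2 if you want phrases not words
--                 full_string = compile_substring(startix, endix-1, ssplit)
--                 matches.extend(["1"]*(endix-startix))
--                 matchstrings[full_string] +=1
--
--             startix = endix
--
--     return matches
-- ===== SOURCE B (Python) =====
-- def make_BIO_tgt(s, t, mental_retrieve=False):
--     # Exploits that " ".join(s[i:e]) for growing e is a chain of string prefixes,
--     # and a prefix of a substring of t is itself a substring of t: so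
--     # "window in t" is a monotone predicate of the window length, and the
--     # maximal copyable phrase starting at i is found by EXPONENTIAL + BINARY
--     # SEARCH on its end index instead of extending the window word by word.
--     n = len(s)
--
--     def reach(i):
--         # largest e in [i, n-1] with e == i or " ".join(s[i:e]) in t
--         # galloping phase: double the window until it falls out of t (or off the end)
--         step = 1
--         while i + step <= n - 1 and " ".join(s[i:i + step]) in t:
--             step *= 2
--         lo = i + step // 2
--         hi = min(n - 1, i + step - 1)
--         # binary search on the monotone predicate inside [lo, hi]
--         while lo < hi:
--             mid = (lo + hi + 1) // 2
--             if " ".join(s[i:mid]) in t: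
--                 lo = mid
--             else:
--                 hi = mid - 1
--         return lo
--
--     tags = []
--     i = 0
--     while i < n:
--         e = reach(i)
--         if e == i:
--             tags.append("0")
--             i += 1
--         else:
--             tags.extend(["1"] * (e - i))
--             i = e
--     return tags
-- ===== Notes on version B (the rewrite author's own statement) =====
-- stated objective: alternative
-- what changed: Instead of A's state machine that grows the search window one word at a time and re-tests each grown window, B finds the maximal copyable phrase end per segment by exponential (galloping) search followed by binary search, using the fact that 'window in t' is monotone in window length (a shorter window is a string prefix of a longer one, and a prefix of a substring of t is a substring of t).
import Mathlib
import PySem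

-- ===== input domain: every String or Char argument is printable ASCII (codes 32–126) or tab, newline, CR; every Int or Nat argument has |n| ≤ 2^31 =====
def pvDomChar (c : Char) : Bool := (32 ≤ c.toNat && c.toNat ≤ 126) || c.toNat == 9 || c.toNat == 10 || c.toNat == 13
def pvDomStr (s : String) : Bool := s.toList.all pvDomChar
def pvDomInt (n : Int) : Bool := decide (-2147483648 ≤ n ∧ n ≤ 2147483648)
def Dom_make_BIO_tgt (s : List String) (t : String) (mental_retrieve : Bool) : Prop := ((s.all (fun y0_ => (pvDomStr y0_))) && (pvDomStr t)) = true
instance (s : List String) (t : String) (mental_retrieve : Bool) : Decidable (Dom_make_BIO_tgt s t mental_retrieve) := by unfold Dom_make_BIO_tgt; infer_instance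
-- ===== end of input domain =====

-- B replaces A's word-by-word window extension by an exponential-then-binary SEARCH for the maximal
-- copyable phrase end, exploiting that "window in t" is monotone in the window length
-- (a shorter window is a string prefix of a longer one, and a prefix of a substring
-- of t is a substring of t); objective: alternative algorithm.
-- A's unused local Counter `matchstrings` has no effect on the return value and is
-- dropped from the port.

-- ===== PORT A =====
-- A's helper; its indices are always in range at every call site of A, so split[start]
-- is ported as getD (exact on all reachable calls).
def compile_substring (start «end» : Nat) (split : List String) : String :=
  if start = «end» then split.getD start ""
  else PySem.Str.join " " (PySem.List.slice split (some (start : Int)) (some ((«end» : Int) + 1)))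

-- the while-loop of A, state (startix, endix, matches); the fuel argument only makes the
-- recursion structural (2*|s|+1 steps always suffice: the loop measure 2*(len-endix)+(endix-startix)
-- strictly decreases), it guards totality and changes nothing else
def loopA (s : List String) (t : String) : Nat → Nat → Nat → List String → List String
  | 0, _, _, acc => acc
  | fuel + 1, startix, endix, acc =>
    if endix < s.length then
      if PySem.Str.isIn (compile_substring startix endix s) t && decide (endix < s.length - 1) then
        loopA s t fuel startix (endix + 1) acc
      else if startix ≥ endix then
        loopA s t fuel (endix + 1) (endix + 1) (acc ++ List.replicate (endix - startix + 1) "0")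
      else
        loopA s t fuel endix endix (acc ++ List.replicate (endix - startix) "1")
    else acc

def make_BIO_tgt (s : List String) (t : String) (mental_retrieve : Bool) : List String :=
  loopA s t (2 * s.length + 1) 0 0 []

-- ===== PORT B =====
-- B's binary-search loop (the second while-loop of reach); all quantities are
-- nonnegative so Python's (lo+hi+1)//2 is exactly Nat division; the fuel only
-- makes the recursion structural (hi - lo strictly decreases, so |s| steps suffice)
def reachLoop (s : List String) (t : String) (i : Nat) : Nat → Nat → Nat → Nat
  | 0, lo, _ => lo
  | fuel + 1, lo, hi =>
    if lo < hi then
      if PySem.Str.isIn (PySem.Str.join " " (PySem.List.slice s (some (i : Int)) (some (((lo + hi + 1) / 2 : Nat) : Int)))) t then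
        reachLoop s t i fuel ((lo + hi + 1) / 2) hi
      else
        reachLoop s t i fuel lo ((lo + hi + 1) / 2 - 1)
    else lo

-- B's galloping loop (the first while-loop of reach): doubles the window until it
-- falls out of t or off the end; fuel |s| suffices (the loop runs only while
-- i + step ≤ |s| - 1 and step at least doubles)
def gallopLoop (s : List String) (t : String) (i : Nat) : Nat → Nat → Nat
  | 0, step => step
  | fuel + 1, step =>
    if decide (i + step ≤ s.length - 1) && PySem.Str.isIn (PySem.Str.join " " (PySem.List.slice s (some (i : Int)) (some ((i + step : Nat) : Int)))) t then
      gallopLoop s t i fuel (2 * step)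
    else step

def reach (s : List String) (t : String) (i : Nat) : Nat :=
  reachLoop s t i s.length (i + gallopLoop s t i s.length 1 / 2)
    (min (s.length - 1) (i + gallopLoop s t i s.length 1 - 1))

-- B's outer while-loop over segment starts (fuel |s|+1 suffices: i strictly increases)
def outerB (s : List String) (t : String) : Nat → Nat → List String → List String
  | 0, _, tags => tags
  | fuel + 1, i, tags =>
    if i < s.length then
      if reach s t i = i then
        outerB s t fuel (i + 1) (tags ++ ["0"])
      else
        outerB s t fuel (reach s t i) (tags ++ List.replicate (reach s t i - i) "1")
    else tags

def make_BIO_tgt_alt (s : List String) (t : String) (mental_retrieve : Bool) : List String :=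
  outerB s t (s.length + 1) 0 []

-- ===== PRECONDITION & SPEC =====
def Spec_make_BIO_tgt (s : List String) (t : String) (mental_retrieve : Bool) (out : List String) : Prop := out = make_BIO_tgt_alt s t mental_retrieve
instance (s : List String) (t : String) (mental_retrieve : Bool) (out : List String) : Decidable (Spec_make_BIO_tgt s t mental_retrieve out) := by unfold Spec_make_BIO_tgt; infer_instance

-- ===== CLAIM (what is proved, stated in full; the proofs are below) =====
def Claim_equal_make_BIO_tgt : Prop := ∀ (s : List String) (t : String) (mental_retrieve : Bool), Dom_make_BIO_tgt s t mental_retrieve → Spec_make_BIO_tgt s t mental_retrieve (make_BIO_tgt s t mental_retrieve)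

-- ===== LEMMAS AND PROOFS =====

-- ghost proof helper (not part of either port): A's extension phase as a standalone
-- loop, the bridge between loopA's window growth and B's binary search
def extendLoop (s : List String) (t : String) : Nat → Nat → String → Nat × String
  | 0, e, cur => (e, cur)
  | fuel + 1, e, cur =>
    if decide (e < s.length - 1) && PySem.Str.isIn cur t then
      extendLoop s t fuel (e + 1) (cur ++ " " ++ s.getD (e + 1) "")
    else (e, cur)

theorem chars_join_append (sep y : List Char) (a : List Char) (xs : List (List Char)) :
    PySem.Chars.join sep ((a :: xs) ++ [y]) = PySem.Chars.join sep (a :: xs) ++ sep ++ y := by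
  induction xs generalizing a with
  | nil =>
      rw [List.cons_append, List.nil_append, PySem.Chars.join_cons_cons,
        PySem.Chars.join_singleton, PySem.Chars.join_singleton]
  | cons b xs ih =>
      rw [List.cons_append, List.cons_append, PySem.Chars.join_cons_cons, ← List.cons_append,
        ih b, PySem.Chars.join_cons_cons]
      simp [List.append_assoc]

theorem slice_window (s : List String) (i b : Nat) :
    PySem.List.slice s (some (i : Int)) (some ((b : Int) + 1)) = (s.drop i).take (b + 1 - i) := by
  have : ((b : Int) + 1) = ((b + 1 : Nat) : Int) := by push_cast; ring
  rw [this, PySem.List.slice_natCast]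

-- the incrementally built window string equals A's re-joined slice
theorem csub_succ (s : List String) (i e : Nat) (h1 : i ≤ e) (h2 : e + 1 < s.length) :
    compile_substring i (e + 1) s = compile_substring i e s ++ " " ++ s.getD (e + 1) "" := by
  have hdrop : (s.drop i).take (e + 2 - i) = (s.drop i).take (e + 1 - i) ++ [s.getD (e + 1) ""] := by
    have h4 : e + 2 - i = (e + 1 - i) + 1 := by omega
    rw [h4, List.take_add_one]
    have h5 : (s.drop i)[e + 1 - i]? = some (s.getD (e + 1) "") := by
      rw [List.getElem?_drop, show i + (e + 1 - i) = e + 1 by omega,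
        List.getElem?_eq_getElem h2, List.getD_eq_getElem s "" h2]
    simp [h5]
  by_cases hie : i = e
  · subst hie
    unfold compile_substring
    rw [if_neg (by omega), if_pos rfl, slice_window]
    apply String.toList_inj.mp
    rw [show i + 1 + 1 - i = 2 by omega,
      List.drop_eq_getElem_cons (show i < s.length by omega),
      List.drop_eq_getElem_cons (show i + 1 < s.length by omega),
      show (2 : Nat) = 0 + 1 + 1 from rfl, List.take_succ_cons, List.take_succ_cons,
      List.take_zero]
    simp only [PySem.Str.toList_join, List.map_cons, List.map_nil,
      PySem.Chars.join_cons_cons, PySem.Chars.join_singleton, String.toList_append,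
      List.getD_eq_getElem s "" (show i < s.length by omega),
      List.getD_eq_getElem s "" (show i + 1 < s.length by omega)]
  · unfold compile_substring
    rw [if_neg (by omega), if_neg (by omega), slice_window, slice_window]
    apply String.toList_inj.mp
    have hne : (s.drop i).take (e + 1 - i) ≠ [] := by
      simp [List.take_eq_nil_iff, List.drop_eq_nil_iff]; omega
    obtain ⟨a, xs, hax⟩ := List.exists_cons_of_ne_nil hne
    rw [show e + 1 + 1 - i = e + 2 - i by omega, hdrop, hax]
    simp only [PySem.Str.toList_join, String.toList_append, List.map_append, List.map_cons,
      List.map_nil]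
    exact chars_join_append _ _ _ _

theorem extendLoop_fst_ge (s : List String) (t : String) :
    ∀ (f e : Nat) (cur : String), e ≤ (extendLoop s t f e cur).1 := by
  intro f
  induction f with
  | zero => intro e cur; simp [extendLoop]
  | succ f ih =>
      intro e cur
      rw [extendLoop]
      by_cases hc : (decide (e < s.length - 1) && PySem.Str.isIn cur t) = true
      · rw [if_pos hc]
        exact le_trans (by omega) (ih (e + 1) _)
      · rw [if_neg hc]

-- loopA's result does not depend on the fuel once it exceeds the loop measure
theorem loopA_fuel_congr (s : List String) (t : String) :
    ∀ (f1 f2 startix endix : Nat) (acc : List String),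
      2 * (s.length - endix) + (endix - startix) < f1 →
      2 * (s.length - endix) + (endix - startix) < f2 →
      loopA s t f1 startix endix acc = loopA s t f2 startix endix acc := by
  intro f1
  induction f1 with
  | zero => intro f2 st en acc h1 h2; omega
  | succ f1 ih =>
      intro f2 st en acc h1 h2
      obtain ⟨g2, rfl⟩ : ∃ g2, f2 = g2 + 1 := ⟨f2 - 1, by omega⟩
      rw [loopA, loopA]
      by_cases hlt : en < s.length
      · rw [if_pos hlt, if_pos hlt]
        by_cases hc : (PySem.Str.isIn (compile_substring st en s) t && decide (en < s.length - 1)) = true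
        · have hen : en < s.length - 1 := of_decide_eq_true ((Bool.and_eq_true _ _).mp hc).2
          rw [if_pos hc, if_pos hc]
          exact ih g2 st (en + 1) acc (by omega) (by omega)
        · rw [if_neg hc, if_neg hc]
          by_cases hse : st ≥ en
          · rw [if_pos hse, if_pos hse]
            exact ih g2 (en + 1) (en + 1) _ (by omega) (by omega)
          · rw [if_neg hse, if_neg hse]
            exact ih g2 en en _ (by omega) (by omega)
      · rw [if_neg hlt, if_neg hlt]

-- A's extension phase equals the ghost inner loop followed by the segment emission
theorem extPhase (s : List String) (t : String) :
    ∀ (k fA fB e i : Nat) (acc : List String),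
      s.length - e ≤ k → i ≤ e → e < s.length →
      2 * (s.length - e) + (e - i) < fA → s.length - 1 - e < fB →
      loopA s t fA i e acc =
        (if i ≥ (extendLoop s t fB e (compile_substring i e s)).1 then
          loopA s t (2 * (s.length - ((extendLoop s t fB e (compile_substring i e s)).1 + 1)) + 1)
                    ((extendLoop s t fB e (compile_substring i e s)).1 + 1)
                    ((extendLoop s t fB e (compile_substring i e s)).1 + 1)
                    (acc ++ List.replicate ((extendLoop s t fB e (compile_substring i e s)).1 - i + 1) "0")
        else
          loopA s t (2 * (s.length - (extendLoop s t fB e (compile_substring i e s)).1) + 1)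
                    (extendLoop s t fB e (compile_substring i e s)).1
                    (extendLoop s t fB e (compile_substring i e s)).1
                    (acc ++ List.replicate ((extendLoop s t fB e (compile_substring i e s)).1 - i) "1")) := by
  intro k
  induction k with
  | zero => intro fA fB e i acc hk h1 h2; omega
  | succ k ih =>
      intro fA fB e i acc hk h1 h2 hfA hfB
      obtain ⟨m, rfl⟩ : ∃ m, fA = m + 1 := ⟨fA - 1, by omega⟩
      obtain ⟨mB, rfl⟩ : ∃ mB, fB = mB + 1 := ⟨fB - 1, by omega⟩
      rw [loopA, if_pos h2]
      by_cases hc : (PySem.Str.isIn (compile_substring i e s) t && decide (e < s.length - 1)) = true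
      · have he1 : e + 1 < s.length := by
          have h5 := (Bool.and_eq_true _ _).mp hc
          have := of_decide_eq_true h5.2
          omega
        have hcomm : (decide (e < s.length - 1) && PySem.Str.isIn (compile_substring i e s) t) = true := by
          rw [Bool.and_comm]; exact hc
        rw [if_pos hc, extendLoop, if_pos hcomm, ← csub_succ s i e h1 he1]
        exact ih m mB (e + 1) i acc (by omega) (by omega) he1 (by omega) (by omega)
      · have hcomm : ¬((decide (e < s.length - 1) && PySem.Str.isIn (compile_substring i e s) t) = true) := by
          rw [Bool.and_comm]; exact hc
        rw [if_neg hc, extendLoop, if_neg hcomm]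
        by_cases hse : i ≥ e
        · rw [if_pos hse, if_pos hse]
          exact loopA_fuel_congr s t m _ (e + 1) (e + 1) _ (by omega) (by omega)
        · rw [if_neg hse, if_neg hse]
          exact loopA_fuel_congr s t m _ e e _ (by omega) (by omega)

-- ---- the binary search computes the same maximal end index as the extension loop ----

-- a shorter window is a string prefix of a longer one
theorem csub_prefix (s : List String) (i : Nat) :
    ∀ (e e' : Nat), i ≤ e' → e' ≤ e → e < s.length →
      (compile_substring i e' s).toList <+: (compile_substring i e s).toList := by
  intro e
  induction e with
  | zero => intro e' h1 h2 h3; interval_cases e'; exact List.prefix_refl _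
  | succ e ih =>
      intro e' h1 h2 h3
      rcases Nat.lt_or_ge e' (e + 1) with hlt | hge
      · have hpre := ih e' h1 (by omega) (by omega)
        rw [csub_succ s i e (by omega) h3]
        refine hpre.trans ?_
        simp [List.prefix_append]
      · have : e' = e + 1 := by omega
        subst this; exact List.prefix_refl _

-- monotonicity: a window that is in t stays in t when shortened
theorem isIn_mono (s : List String) (t : String) (i e e' : Nat)
    (h1 : i ≤ e') (h2 : e' ≤ e) (h3 : e < s.length)
    (h : PySem.Str.isIn (compile_substring i e s) t = true) :
    PySem.Str.isIn (compile_substring i e' s) t = true := by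
  rw [PySem.Str.isIn_iff_infix] at h ⊢
  exact ((csub_prefix s i e e' h1 h2 h3).isInfix).trans h

-- the characterizing property of the maximal end index of the segment starting at i
def MaxEnd (s : List String) (t : String) (i r : Nat) : Prop :=
  i ≤ r ∧ r ≤ s.length - 1 ∧
  (r = i ∨ PySem.Str.isIn (compile_substring i (r - 1) s) t = true) ∧
  (r = s.length - 1 ∨ PySem.Str.isIn (compile_substring i r s) t = false)

theorem maxEnd_unique (s : List String) (t : String) (i r1 r2 : Nat)
    (hn : i < s.length) (h1 : MaxEnd s t i r1) (h2 : MaxEnd s t i r2) : r1 = r2 := by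
  obtain ⟨a1, b1, c1, d1⟩ := h1
  obtain ⟨a2, b2, c2, d2⟩ := h2
  by_contra hne
  -- wlog r1 < r2
  rcases Nat.lt_or_ge r1 r2 with hlt | hge
  · have hd1 : PySem.Str.isIn (compile_substring i r1 s) t = false := by
      rcases d1 with h | h
      · omega
      · exact h
    have hc2 : PySem.Str.isIn (compile_substring i (r2 - 1) s) t = true := by
      rcases c2 with h | h
      · omega
      · exact h
    have := isIn_mono s t i (r2 - 1) r1 a1 (by omega) (by omega) hc2
    rw [hd1] at this; exact absurd this (by simp)
  · have hlt : r2 < r1 := by omega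
    have hd2 : PySem.Str.isIn (compile_substring i r2 s) t = false := by
      rcases d2 with h | h
      · omega
      · exact h
    have hc1 : PySem.Str.isIn (compile_substring i (r1 - 1) s) t = true := by
      rcases c1 with h | h
      · omega
      · exact h
    have := isIn_mono s t i (r1 - 1) r2 a2 (by omega) (by omega) hc1
    rw [hd2] at this; exact absurd this (by simp)

-- the ghost extension loop's result satisfies MaxEnd
theorem extendLoop_maxEnd (s : List String) (t : String) (i : Nat) :
    ∀ (f e : Nat), i ≤ e → e ≤ s.length - 1 → i < s.length →
      (e = i ∨ PySem.Str.isIn (compile_substring i (e - 1) s) t = true) →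
      s.length - 1 - e < f →
      MaxEnd s t i (extendLoop s t f e (compile_substring i e s)).1 := by
  intro f
  induction f with
  | zero => intro e h1 h2 h3 h4 h5; omega
  | succ f ih =>
      intro e h1 h2 h3 h4 h5
      rw [extendLoop]
      by_cases hc : (decide (e < s.length - 1) && PySem.Str.isIn (compile_substring i e s) t) = true
      · have hel : e < s.length - 1 := of_decide_eq_true ((Bool.and_eq_true _ _).mp hc).1
        have hin := ((Bool.and_eq_true _ _).mp hc).2
        rw [if_pos hc, ← csub_succ s i e h1 (by omega)]
        exact ih (e + 1) (by omega) (by omega) h3 (Or.inr (by simpa using hin)) (by omega)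
      · rw [if_neg hc]
        refine ⟨h1, h2, h4, ?_⟩
        by_cases he : e = s.length - 1
        · exact Or.inl he
        · refine Or.inr ?_
          rcases Bool.eq_false_or_eq_true (PySem.Str.isIn (compile_substring i e s) t) with h | h
          · exact absurd (by rw [h, Bool.and_true]; exact decide_eq_true (by omega)) hc
          · exact h

-- the joined Python slice s[i:m] is A's compiled window i..m-1
theorem join_slice_csub (s : List String) (i m : Nat) (h1 : i < m) (h2 : m - 1 < s.length) :
    PySem.Str.join " " (PySem.List.slice s (some (i : Int)) (some ((m : Nat) : Int))) = compile_substring i (m - 1) s := by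
  have hcast : ((m : Nat) : Int) = ((m - 1 : Nat) : Int) + 1 := by
    push_cast [Nat.cast_sub (show 1 ≤ m by omega)]; ring
  rw [hcast]
  by_cases hone : i = m - 1
  · rw [slice_window, ← hone, show i + 1 - i = 1 by omega]
    unfold compile_substring
    rw [if_pos rfl]
    apply String.toList_inj.mp
    rw [List.drop_eq_getElem_cons (show i < s.length by omega), List.take_succ_cons,
      List.take_zero]
    simp [PySem.Str.toList_join, PySem.Chars.join_singleton,
      List.getElem?_eq_getElem (show i < s.length by omega)]
  · unfold compile_substring
    rw [if_neg hone]

-- the binary-search loop's result satisfies MaxEnd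
theorem reachLoop_maxEnd (s : List String) (t : String) (i : Nat) (hn : i < s.length) :
    ∀ (f lo hi : Nat), hi - lo < f → i ≤ lo → lo ≤ hi → hi ≤ s.length - 1 →
      (lo = i ∨ PySem.Str.isIn (compile_substring i (lo - 1) s) t = true) →
      (hi = s.length - 1 ∨ PySem.Str.isIn (compile_substring i hi s) t = false) →
      MaxEnd s t i (reachLoop s t i f lo hi) := by
  intro f
  induction f with
  | zero => intro lo hi h0; omega
  | succ f ih =>
      intro lo hi hf h1 h2 h3 hP hH
      rw [reachLoop]
      by_cases hlh : lo < hi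
      · rw [if_pos hlh]
        have hmid1 : lo < (lo + hi + 1) / 2 := by omega
        have hmid2 : (lo + hi + 1) / 2 ≤ hi := by omega
        rw [join_slice_csub s i ((lo + hi + 1) / 2) (by omega) (by omega)]
        by_cases hc : PySem.Str.isIn (compile_substring i ((lo + hi + 1) / 2 - 1) s) t = true
        · rw [if_pos hc]
          exact ih ((lo + hi + 1) / 2) hi (by omega) (by omega) hmid2 h3
            (Or.inr hc) hH
        · rw [if_neg hc]
          refine ih lo ((lo + hi + 1) / 2 - 1) (by omega) h1 (by omega) (by omega) hP ?_
          exact Or.inr (by simpa using hc)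
      · rw [if_neg hlh]
        have : lo = hi := by omega
        subst this
        exact ⟨h1, h3, hP, hH⟩

-- the galloping loop's final step bounds the phrase end from both sides
theorem gallopLoop_post (s : List String) (t : String) (i : Nat) (hn : i < s.length) :
    ∀ (f step : Nat), s.length - (i + step) < f → 1 ≤ step →
      (i + step / 2 = i ∨ (i + step / 2 ≤ s.length - 1 ∧
        PySem.Str.isIn (compile_substring i (i + step / 2 - 1) s) t = true)) →
      1 ≤ gallopLoop s t i f step ∧
      (i + gallopLoop s t i f step / 2 = i ∨ (i + gallopLoop s t i f step / 2 ≤ s.length - 1 ∧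
        PySem.Str.isIn (compile_substring i (i + gallopLoop s t i f step / 2 - 1) s) t = true)) ∧
      (s.length - 1 < i + gallopLoop s t i f step ∨
        PySem.Str.isIn (compile_substring i (i + gallopLoop s t i f step - 1) s) t = false) := by
  intro f
  induction f with
  | zero => intro step h0; omega
  | succ f ih =>
      intro step hf h1 hP
      rw [gallopLoop]
      by_cases hc : (decide (i + step ≤ s.length - 1) && PySem.Str.isIn (PySem.Str.join " " (PySem.List.slice s (some (i : Int)) (some ((i + step : Nat) : Int)))) t) = true
      · rw [if_pos hc]
        have hle : i + step ≤ s.length - 1 := of_decide_eq_true ((Bool.and_eq_true _ _).mp hc).1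
        have hin := ((Bool.and_eq_true _ _).mp hc).2
        rw [join_slice_csub s i (i + step) (by omega) (by omega)] at hin
        refine ih (2 * step) (by omega) (by omega) ?_
        refine Or.inr ?_
        rw [show 2 * step / 2 = step by omega]
        exact ⟨hle, by simpa using hin⟩
      · rw [if_neg hc]
        refine ⟨h1, hP, ?_⟩
        by_cases hle : i + step ≤ s.length - 1
        · refine Or.inr ?_
          rcases Bool.eq_false_or_eq_true (PySem.Str.isIn (PySem.Str.join " " (PySem.List.slice s (some (i : Int)) (some ((i + step : Nat) : Int)))) t) with h | h
          · exact absurd (by rw [h, Bool.and_true]; exact decide_eq_true hle) hc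
          · rw [join_slice_csub s i (i + step) (by omega) (by omega)] at h
            exact h
        · exact Or.inl (by omega)

-- hence B's reach equals the ghost extension loop's end index
theorem reach_eq_extend (s : List String) (t : String) (i : Nat) (hn : i < s.length) :
    reach s t i = (extendLoop s t s.length i (s.getD i "")).1 := by
  have hcs : compile_substring i i s = s.getD i "" := by
    unfold compile_substring; rw [if_pos rfl]
  have hE : MaxEnd s t i (extendLoop s t s.length i (s.getD i "")).1 := by
    rw [← hcs]
    exact extendLoop_maxEnd s t i s.length i le_rfl (by omega) hn (Or.inl rfl) (by omega)
  obtain ⟨hS1, hSP, hSH⟩ := gallopLoop_post s t i hn s.length 1 (by omega) le_rfl (Or.inl (by omega))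
  have hR : MaxEnd s t i (reach s t i) := by
    unfold reach
    refine reachLoop_maxEnd s t i hn s.length _ _ ?_ ?_ ?_ ?_ ?_ ?_
    · omega
    · omega
    · rcases hSP with h | h <;> omega
    · omega
    · rcases hSP with h | h
      · exact Or.inl h
      · exact Or.inr h.2
    · by_cases hle : i + gallopLoop s t i s.length 1 - 1 ≤ s.length - 1
      · rcases hSH with h | h
        · exact Or.inl (by omega)
        · rw [Nat.min_eq_right hle]
          exact Or.inr h
      · rw [Nat.min_eq_left (by omega)]
        exact Or.inl rfl
  exact maxEnd_unique s t i _ _ hn hR hE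

-- the ghost outer loop (A's emission phases), phrased with extendLoop
def outerLoop (s : List String) (t : String) : Nat → Nat → List String → List String
  | 0, _, tags => tags
  | fuel + 1, i, tags =>
    if i < s.length then
      if (extendLoop s t s.length i (s.getD i "")).1 = i then
        outerLoop s t fuel (i + 1) (tags ++ ["0"])
      else
        outerLoop s t fuel ((extendLoop s t s.length i (s.getD i "")).1)
          (tags ++ List.replicate ((extendLoop s t s.length i (s.getD i "")).1 - i) "1")
    else tags

theorem outerB_eq_outerLoop (s : List String) (t : String) :
    ∀ (f i : Nat) (tags : List String), outerB s t f i tags = outerLoop s t f i tags := by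
  intro f
  induction f with
  | zero => intro i tags; rfl
  | succ f ih =>
      intro i tags
      rw [outerB, outerLoop]
      by_cases h : i < s.length
      · rw [if_pos h, if_pos h, reach_eq_extend s t i h]
        by_cases he : (extendLoop s t s.length i (s.getD i "")).1 = i
        · rw [if_pos he, if_pos he, ih]
        · rw [if_neg he, if_neg he, ih]
      · rw [if_neg h, if_neg h]

theorem loopA_eq_outerLoop_aux (s : List String) (t : String) :
    ∀ (k i fO : Nat) (acc : List String), s.length - i ≤ k → s.length - i < fO →
      loopA s t (2 * (s.length - i) + 1) i i acc = outerLoop s t fO i acc := by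
  intro k
  induction k with
  | zero =>
      intro i fO acc hk hfO
      obtain ⟨g, rfl⟩ : ∃ g, fO = g + 1 := ⟨fO - 1, by omega⟩
      rw [loopA, if_neg (by omega), outerLoop, if_neg (by omega)]
  | succ k ih =>
      intro i fO acc hk hfO
      obtain ⟨g, rfl⟩ : ∃ g, fO = g + 1 := ⟨fO - 1, by omega⟩
      by_cases h : i < s.length
      · have hcs : compile_substring i i s = s.getD i "" := by
          unfold compile_substring; rw [if_pos rfl]
        have hge := extendLoop_fst_ge s t s.length i (s.getD i "")
        rw [extPhase s t (k + 1) (2 * (s.length - i) + 1) s.length i i acc hk le_rfl h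
          (by omega) (by omega), hcs, outerLoop, if_pos h]
        by_cases he : (extendLoop s t s.length i (s.getD i "")).1 = i
        · rw [if_pos (by omega), if_pos he, he]
          rw [show i - i + 1 = 1 by omega, List.replicate_one]
          exact ih (i + 1) g (acc ++ ["0"]) (by omega) (by omega)
        · rw [if_neg (by omega), if_neg he]
          exact ih _ g _ (by omega) (by omega)
      · rw [loopA, if_neg (by omega), outerLoop, if_neg (by omega)]

-- ===== VERDICT (by name: the statement is the Claim_ definition above) =====
theorem make_BIO_tgt_spec : Claim_equal_make_BIO_tgt := by
  intro s t m _
  unfold Spec_make_BIO_tgt make_BIO_tgt make_BIO_tgt_alt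
  rw [outerB_eq_outerLoop]
  have := loopA_eq_outerLoop_aux s t s.length 0 (s.length + 1) [] (by omega) (by omega)
  simpa using this
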